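-- pv_equiv track=rewrite | github.com/amesarbhumika/Advent-Of-Code-2024-Solutions | Day-09/day9.py | is_compacted
-- ===== SOURCE A (Python) =====
-- def is_compacted(disk):
--     is_empty = False
--     for i in disk:
--         if i == -1:
--             is_empty = True
--         if i != -1 and is_empty:
--             return False
--     return True
-- ===== SOURCE B (Python) =====
-- def is_compacted(disk):
--     try:
--         i = disk.index(-1)
--     except ValueError:
--         return True
--     return all(x == -1 for x in disk[i:])
-- ===== Notes on version B (the rewrite author's own statement) =====
-- stated objective: alternative
-- what changed: B replaces A's single flagged scan with a two-phase split: find the first -1 via disk.index, then check the tail slice is all -1.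
import Mathlib
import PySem

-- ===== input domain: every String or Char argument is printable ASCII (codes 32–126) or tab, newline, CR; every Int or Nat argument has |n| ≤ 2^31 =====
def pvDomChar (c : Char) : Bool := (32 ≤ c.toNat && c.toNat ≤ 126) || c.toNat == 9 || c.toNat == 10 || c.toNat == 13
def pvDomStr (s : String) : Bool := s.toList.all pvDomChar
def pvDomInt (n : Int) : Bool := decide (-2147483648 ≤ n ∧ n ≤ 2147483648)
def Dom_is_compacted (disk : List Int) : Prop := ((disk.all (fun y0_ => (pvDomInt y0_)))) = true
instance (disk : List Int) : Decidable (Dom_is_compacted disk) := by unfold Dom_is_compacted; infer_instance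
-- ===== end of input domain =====

-- B replaces A's single flagged scan with a two-phase split: find the first -1, then check the tail slice is all -1 (same cost, different decomposition).


-- ===== PORT A =====
-- running 'is_empty' flag; early return False when a data block follows an empty one
def isCompactedGo : List Int → Bool → Bool
  | [], _ => true
  | i :: rest, is_empty =>
    let is_empty := if i = -1 then true else is_empty
    if i ≠ -1 ∧ is_empty then false
    else isCompactedGo rest is_empty

def is_compacted (disk : List Int) : Bool := isCompactedGo disk false

-- ===== PORT B =====
-- B: find first -1 (disk.index), then check the tail slice disk[i:] is all -1
def is_compacted_alt (disk : List Int) : Bool :=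
  match PySem.List.index? disk (-1) with
  | none => true
  | some i => (PySem.List.slice disk (some (i : Int)) none).all (fun x => x == -1)

-- ===== PRECONDITION & SPEC =====
def Spec_is_compacted (disk : List Int) (out : Bool) : Prop := out = is_compacted_alt disk
instance (disk : List Int) (out : Bool) : Decidable (Spec_is_compacted disk out) := by unfold Spec_is_compacted; infer_instance

-- ===== CLAIM (what is proved, stated in full; the proofs are below) =====
def Claim_equal_is_compacted : Prop := ∀ (disk : List Int), Dom_is_compacted disk → Spec_is_compacted disk (is_compacted disk)

-- ===== LEMMAS AND PROOFS =====

-- ===== VERDICT (by name: the statement is the Claim_ definition above) =====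
theorem goTrue_eq_all (disk : List Int) :
    isCompactedGo disk true = disk.all (fun x => x == -1) := by
  induction disk with
  | nil => rfl
  | cons i rest ih =>
    by_cases h : i = -1 <;> simp [isCompactedGo, h, ih]

theorem go_false_eq_alt (disk : List Int) :
    isCompactedGo disk false = is_compacted_alt disk := by
  induction disk with
  | nil => rfl
  | cons i rest ih =>
    by_cases h : i = -1
    · subst h
      rw [is_compacted_alt, PySem.List.index?_cons_self]
      simp [isCompactedGo, goTrue_eq_all]
    · rw [is_compacted_alt, PySem.List.index?_cons_of_ne rest h]
      rw [isCompactedGo]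
      simp only [h, if_neg, not_false_iff]
      rw [ih, is_compacted_alt]
      cases hidx : PySem.List.index? rest (-1) with
      | none => simp
      | some k =>
        simp only [Option.map_some, PySem.List.slice_from_natCast, List.drop_succ_cons]
        simp

theorem is_compacted_spec : Claim_equal_is_compacted := by
  intro disk _
  unfold Spec_is_compacted is_compacted
  exact go_false_eq_alt disk
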